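-- pv_equiv track=rewrite | github.com/om3105/IoT-Traffic-Management-System | Project/thingspeak_client.py | _encode_density
-- ===== SOURCE A (Python) =====
-- def _encode_density(road_data):
--     """Encode overall density as numeric value for ThingSpeak."""
--     densities = [rd["density"] for rd in road_data.values()]
--
--     if "HIGH" in densities:
--         return 3  # High
--     elif "MEDIUM" in densities:
--         return 2  # Medium
--     else:
--         return 1  # Low
-- ===== SOURCE B (Python) =====
-- def _encode_density(road_data):
--     """Encode overall density as numeric value for ThingSpeak."""
--     priority = {"HIGH": 3, "MEDIUM": 2}
--     return max((priority.get(rd["density"], 1) for rd in road_data.values()), default=1)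
-- ===== Notes on version B (the rewrite author's own statement) =====
-- stated objective: idiomatic
-- what changed: Replaces the built list and two ordered membership scans with a single pass taking the maximum of per-road numeric priorities via a mapping with default 1.
import Mathlib
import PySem

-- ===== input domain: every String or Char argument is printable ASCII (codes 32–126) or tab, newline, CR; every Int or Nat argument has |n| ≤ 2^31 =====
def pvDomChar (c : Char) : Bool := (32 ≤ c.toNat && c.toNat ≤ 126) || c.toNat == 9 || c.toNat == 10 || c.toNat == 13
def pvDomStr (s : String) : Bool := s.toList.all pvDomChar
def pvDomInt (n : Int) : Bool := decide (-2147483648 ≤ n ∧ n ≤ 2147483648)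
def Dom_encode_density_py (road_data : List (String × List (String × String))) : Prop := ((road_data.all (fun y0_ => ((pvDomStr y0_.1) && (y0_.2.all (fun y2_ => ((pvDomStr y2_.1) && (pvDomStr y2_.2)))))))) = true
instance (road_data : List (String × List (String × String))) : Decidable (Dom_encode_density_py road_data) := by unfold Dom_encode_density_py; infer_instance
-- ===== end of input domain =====

-- B replaces the built list and two ordered membership scans with a single max over
-- per-road numeric priorities (HIGH→3, MEDIUM→2, else 1), default 1; same cost, more idiomatic.

-- ===== PORT A =====
-- rd["density"] as Python: Option String, none = KeyError (excluded by Pre_)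
def encode_density_py (road_data : List (String × List (String × String))) : Int :=
  let densities : List (Option String) :=
    road_data.map (fun rd => PySem.Dict.get? (PySem.Dict.mk rd.2) "density")
  if (some "HIGH") ∈ densities then 3
  else if (some "MEDIUM") ∈ densities then 2
  else 1

-- ===== PORT B =====
def pvPriority : PySem.Dict String Int := PySem.Dict.mk [("HIGH", (3 : Int)), ("MEDIUM", 2)]

def encode_density_py_alt (road_data : List (String × List (String × String))) : Int :=
  let prios : List Int :=
    road_data.map (fun rd =>
      PySem.Dict.getD pvPriority ((PySem.Dict.get? (PySem.Dict.mk rd.2) "density").getD "") 1)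
  (PySem.List.max? prios (fun x => x)).getD 1

-- ===== PRECONDITION & SPEC =====
-- Pre_: every road's dict has the key "density" (otherwise both Pythons raise KeyError)
def Pre_encode_density_py (road_data : List (String × List (String × String))) : Prop :=
  ∀ rd ∈ road_data, (PySem.Dict.get? (PySem.Dict.mk rd.2) "density").isSome
instance (road_data : List (String × List (String × String))) : Decidable (Pre_encode_density_py road_data) := by unfold Pre_encode_density_py; infer_instance
def pvWitness_encode_density_py : (List (String × List (String × String))) :=
  [("r1", [("density", "LOW")]), ("r2", [("density", "MEDIUM")])]

def Spec_encode_density_py (road_data : List (String × List (String × String))) (out : Int) : Prop := out = encode_density_py_alt road_data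
instance (road_data : List (String × List (String × String))) (out : Int) : Decidable (Spec_encode_density_py road_data out) := by unfold Spec_encode_density_py; infer_instance

-- ===== CLAIM (what is proved, stated in full; the proofs are below) =====
def Claim_equal_encode_density_py : Prop := ∀ (road_data : List (String × List (String × String))), Dom_encode_density_py road_data → Pre_encode_density_py road_data → Spec_encode_density_py road_data (encode_density_py road_data)

-- ===== LEMMAS AND PROOFS =====

-- per-road priority used by B
def pvPrio1 (rd : String × List (String × String)) : Int :=
  PySem.Dict.getD pvPriority ((PySem.Dict.get? (PySem.Dict.mk rd.2) "density").getD "") 1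

lemma pvPrio1_lookup (v : String) :
    PySem.Dict.getD pvPriority v 1 = (if v = "HIGH" then 3 else if v = "MEDIUM" then 2 else 1) := by
  by_cases h3 : v = "HIGH"
  · subst h3; rfl
  · by_cases h2 : v = "MEDIUM"
    · subst h2; rfl
    · have hb3 : ("HIGH" == v) = false := beq_eq_false_iff_ne.mpr (fun hc => h3 hc.symm)
      have hb2 : ("MEDIUM" == v) = false := beq_eq_false_iff_ne.mpr (fun hc => h2 hc.symm)
      unfold pvPriority PySem.Dict.getD PySem.Dict.get?
      rw [List.find?_cons_of_neg (by simp [hb3]), List.find?_cons_of_neg (by simp [hb2])]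
      simp [h3, h2]

lemma pvPrio1_cases (rd : String × List (String × String)) :
    pvPrio1 rd = 3 ∨ pvPrio1 rd = 2 ∨ pvPrio1 rd = 1 := by
  unfold pvPrio1; rw [pvPrio1_lookup]; split_ifs <;> simp

lemma pvPrio1_eq_three (rd : String × List (String × String)) :
    pvPrio1 rd = 3 ↔ PySem.Dict.get? (PySem.Dict.mk rd.2) "density" = some "HIGH" := by
  unfold pvPrio1; rw [pvPrio1_lookup]
  rcases h : (PySem.Dict.get? (PySem.Dict.mk rd.2) "density") with _ | v <;>
    · simp only [Option.getD_none, Option.getD_some]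
      split_ifs <;> simp_all

lemma pvPrio1_eq_two (rd : String × List (String × String)) :
    pvPrio1 rd = 2 ↔ PySem.Dict.get? (PySem.Dict.mk rd.2) "density" = some "MEDIUM" := by
  unfold pvPrio1; rw [pvPrio1_lookup]
  rcases h : (PySem.Dict.get? (PySem.Dict.mk rd.2) "density") with _ | v <;>
    · simp only [Option.getD_none, Option.getD_some]
      split_ifs <;> simp_all

lemma pv_fold_max (t : List Int) (x : Int) :
    t.foldl max x = max x ((PySem.List.max? t (fun y => y)).getD x) := by
  induction t generalizing x with
  | nil => simp [PySem.List.max?]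
  | cons a t ih =>
    rw [List.foldl_cons, ih (max x a), PySem.List.max?_id_cons, Option.getD_some]
    rcases h : (PySem.List.max? t (fun y => y)) with _ | m
    · have ht : t = [] := (PySem.List.max?_eq_none_iff _ _).mp h
      subst ht; simp
    · have hthis := ih a
      rw [h, Option.getD_some] at hthis
      rw [Option.getD_some, hthis]
      omega

lemma pv_alt_nil : encode_density_py_alt [] = 1 := by
  simp [encode_density_py_alt, PySem.List.max?]

lemma pv_alt_cons (rd : String × List (String × String)) (t : List (String × List (String × String))) :
    encode_density_py_alt (rd :: t) = max (pvPrio1 rd) (encode_density_py_alt t) := by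
  unfold encode_density_py_alt
  simp only [List.map_cons]
  rw [PySem.List.max?_id_cons, Option.getD_some, pv_fold_max]
  rcases h : (PySem.List.max? (t.map (fun rd => PySem.Dict.getD pvPriority ((PySem.Dict.get? (PySem.Dict.mk rd.2) "density").getD "") 1)) (fun y => y)) with _ | m
  · rw [h]
    simp only [Option.getD_none]
    conv_rhs => rw [show pvPrio1 rd = pvPriority.getD ((PySem.Dict.get? (PySem.Dict.mk rd.2) "density").getD "") 1 from rfl]
    rcases pvPrio1_cases rd with hp | hp | hp <;>
      (simp only [pvPrio1] at hp; rw [hp]; try decide)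
  · rw [h]
    simp only [Option.getD_some]
    rfl

lemma pv_main (road_data : List (String × List (String × String))) :
    encode_density_py road_data = encode_density_py_alt road_data := by
  induction road_data with
  | nil => simp [encode_density_py, pv_alt_nil]
  | cons rd t ih =>
    rw [pv_alt_cons, ← ih]
    have h3 := pvPrio1_eq_three rd
    have h2 := pvPrio1_eq_two rd
    unfold encode_density_py
    simp only [List.map_cons, List.mem_cons]
    by_cases mh : (some "HIGH") ∈ t.map (fun rd => PySem.Dict.get? (PySem.Dict.mk rd.2) "density") <;>
      by_cases mm : (some "MEDIUM") ∈ t.map (fun rd => PySem.Dict.get? (PySem.Dict.mk rd.2) "density") <;>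
        rcases pvPrio1_cases rd with hp | hp | hp <;>
          first
          | (have hh := h3.mp hp; simp [hh, mh, mm, hp])
          | (have hn3 : PySem.Dict.get? (PySem.Dict.mk rd.2) "density" ≠ some "HIGH" := by
               intro hc; have := h3.mpr hc; omega
             have hh := h2.mp hp
             have hn3' : ¬ (some "HIGH" = PySem.Dict.get? (PySem.Dict.mk rd.2) "density") := fun hc => hn3 hc.symm
             simp [hh, mh, mm, hp])
          | (have hn3 : PySem.Dict.get? (PySem.Dict.mk rd.2) "density" ≠ some "HIGH" := by
               intro hc; have := h3.mpr hc; omega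
             have hn2 : PySem.Dict.get? (PySem.Dict.mk rd.2) "density" ≠ some "MEDIUM" := by
               intro hc; have := h2.mpr hc; omega
             have hn3' : ¬ (some "HIGH" = PySem.Dict.get? (PySem.Dict.mk rd.2) "density") := fun hc => hn3 hc.symm
             have hn2' : ¬ (some "MEDIUM" = PySem.Dict.get? (PySem.Dict.mk rd.2) "density") := fun hc => hn2 hc.symm
             simp [hn3', hn2', mh, mm, hp])

-- ===== VERDICT (by name: the statement is the Claim_ definition above) =====
theorem encode_density_py_spec : Claim_equal_encode_density_py := by
  intro road_data _ _
  exact pv_main road_data
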